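-- pv_equiv track=rewrite | github.com/MrPoisen/easy_crypt | easy_cryptography/cipher/old/unknown.py | __get_seq_spacing
-- ===== SOURCE A (Python) =====
-- def __get_seq_spacing(ciphertext):
--     seqSpacings = {}
--     for seq_length in range(3, 6):
--         for seq_start in range(len(ciphertext) - seq_length):
--             seq = ciphertext[seq_start:seq_start + seq_length]
--             for i in range(seq_start + seq_length, len(ciphertext) - seq_length):
--                 if ciphertext[i:i + seq_length] == seq:
--                     if seq not in seqSpacings:
--                         seqSpacings[seq] = []
--                     seqSpacings[seq].append(i - seq_start)
--
--     return seqSpacings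
-- ===== SOURCE B (Python) =====
-- def _positions_index(ciphertext, seq_length):
--     # one pass: map each length-L substring to the list of its start positions
--     index = {}
--     for b in range(len(ciphertext) - seq_length):
--         index.setdefault(ciphertext[b:b + seq_length], []).append(b)
--     return index
--
--
-- def _spacings(length, positions):
--     # all spacings between ordered position pairs at distance >= length
--     sp = []
--     tail = positions
--     while tail:
--         a = tail[0]
--         tail = tail[1:]
--         sp.extend(b - a for b in tail if b - a >= length)
--     return sp
--
--
-- def __get_seq_spacing(ciphertext):
--     # Kasiski spacings via a positions index instead of rescanning the text
--     # for every start position.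
--     seqSpacings = {}
--     for seq_length in range(3, 6):
--         for seq, positions in _positions_index(ciphertext, seq_length).items():
--             sp = _spacings(seq_length, positions)
--             if sp:
--                 seqSpacings.setdefault(seq, []).extend(sp)
--     return seqSpacings
-- ===== Notes on version B (the rewrite author's own statement) =====
-- stated objective: faster
-- what changed: Instead of rescanning the whole text for every start position, B builds per length one hash index from each substring to its list of start positions and reads all spacings directly off each repeated substring's position list.
import Mathlib
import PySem

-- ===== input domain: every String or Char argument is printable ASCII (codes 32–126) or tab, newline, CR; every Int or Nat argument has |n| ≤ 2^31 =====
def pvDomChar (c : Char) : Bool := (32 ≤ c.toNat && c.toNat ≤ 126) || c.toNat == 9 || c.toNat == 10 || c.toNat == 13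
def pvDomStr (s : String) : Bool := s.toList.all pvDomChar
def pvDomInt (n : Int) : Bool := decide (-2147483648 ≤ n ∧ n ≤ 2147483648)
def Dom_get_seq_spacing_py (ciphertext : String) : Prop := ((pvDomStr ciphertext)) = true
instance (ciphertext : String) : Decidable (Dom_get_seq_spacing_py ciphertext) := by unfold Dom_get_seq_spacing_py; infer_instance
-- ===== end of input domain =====

-- B replaces A's quadratic rescan of the text by a per-length index from each
-- substring to its position list, reading the spacings off those lists; equal
-- return value on all inputs (objective: faster).

-- ===== PORT A =====
def get_seq_spacing_py (ciphertext : String) : List (String × List Int) :=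
  let n : Int := PySem.Str.len ciphertext
  ((PySem.List.pyRange 3 6 1).foldl (fun d L =>
      (PySem.List.pyRange 0 (n - L) 1).foldl (fun d a =>
        let seq := PySem.Str.slice ciphertext (some a) (some (a + L))
        (PySem.List.pyRange (a + L) (n - L) 1).foldl (fun d i =>
          if PySem.Str.slice ciphertext (some i) (some (i + L)) == seq then
            d.modify seq [] (fun l => l ++ [i - a])
          else d) d) d)
    (PySem.Dict.empty : PySem.Dict String (List Int))).items

-- ===== PORT B =====
def pvIndex (ciphertext : String) (seq_length : Int) : PySem.Dict String (List Int) :=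
  (PySem.List.pyRange 0 (PySem.Str.len ciphertext - seq_length) 1).foldl (fun index b =>
    index.modify (PySem.Str.slice ciphertext (some b) (some (b + seq_length))) []
      (fun l => l ++ [b])) PySem.Dict.empty

-- 'while tail: a = tail[0]; tail = tail[1:]; sp.extend(b - a for b in tail if b - a >= length)'
def pvSpacings (length : Int) : List Int → List Int
  | [] => []
  | a :: tail => (tail.filter (fun b => decide (length ≤ b - a))).map (fun b => b - a) ++ pvSpacings length tail

def get_seq_spacing_py_alt (ciphertext : String) : List (String × List Int) :=
  ((PySem.List.pyRange 3 6 1).foldl (fun d seq_length =>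
      (pvIndex ciphertext seq_length).items.foldl (fun d p =>
        let sp := pvSpacings seq_length p.2
        if sp = [] then d else d.modify p.1 [] (fun l => l ++ sp)) d)
    (PySem.Dict.empty : PySem.Dict String (List Int))).items

-- ===== PRECONDITION & SPEC =====
def Spec_get_seq_spacing_py (ciphertext : String) (out : List (String × List Int)) : Prop := out = get_seq_spacing_py_alt ciphertext
instance (ciphertext : String) (out : List (String × List Int)) : Decidable (Spec_get_seq_spacing_py ciphertext out) := by unfold Spec_get_seq_spacing_py; infer_instance

-- ===== CLAIM (what is proved, stated in full; the proofs are below) =====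
def Claim_equal_get_seq_spacing_py : Prop := ∀ (ciphertext : String), Dom_get_seq_spacing_py ciphertext → Spec_get_seq_spacing_py ciphertext (get_seq_spacing_py ciphertext)

-- ===== LEMMAS AND PROOFS =====

-- abbreviations for the proof: range of starts, substring at a, partners of a, positions of key k
def pvF (ct : String) (L a : Int) : String := PySem.Str.slice ct (some a) (some (a + L))
def pvR (ct : String) (L : Int) : List Int := PySem.List.pyRange 0 (PySem.Str.len ct - L) 1
def pvPt (ct : String) (L a : Int) : List Int :=
  (PySem.List.pyRange (a + L) (PySem.Str.len ct - L) 1).filter (fun i => pvF ct L i == pvF ct L a)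
def pvPos (ct : String) (L : Int) (k : String) : List Int := (pvR ct L).filter (fun b => pvF ct L b == k)
def pvQ (ct : String) (L : Int) (k : String) : Bool := decide (¬ pvSpacings L (pvPos ct L k) = [])
def pvKq (ct : String) (L : Int) : List String :=
  (PySem.Set.ofList ((pvR ct L).map (pvF ct L))).filter (pvQ ct L)
def pvPairs (ct : String) (L : Int) : List (String × Int) :=
  (pvR ct L).flatMap (fun a => (pvPt ct L a).map (fun i => (pvF ct L a, i - a)))

-- the two per-length loop bodies, named
def pvAstep (ct : String) (L : Int) (d0 : PySem.Dict String (List Int)) : PySem.Dict String (List Int) :=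
  (pvR ct L).foldl (fun d a =>
    (PySem.List.pyRange (a + L) (PySem.Str.len ct - L) 1).foldl (fun d i =>
      if pvF ct L i == pvF ct L a then
        d.modify (pvF ct L a) [] (fun l => l ++ [i - a])
      else d) d) d0

def pvBstep (ct : String) (L : Int) (d0 : PySem.Dict String (List Int)) : PySem.Dict String (List Int) :=
  (pvIndex ct L).items.foldl (fun d p =>
    if pvSpacings L p.2 = [] then d else d.modify p.1 [] (fun l => l ++ pvSpacings L p.2)) d0

theorem portA_eq_steps (ct : String) :
    get_seq_spacing_py ct = ((PySem.List.pyRange 3 6 1).foldl (fun d L => pvAstep ct L d) PySem.Dict.empty).items := rfl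

theorem portB_eq_steps (ct : String) :
    get_seq_spacing_py_alt ct = ((PySem.List.pyRange 3 6 1).foldl (fun d L => pvBstep ct L d) PySem.Dict.empty).items := rfl

-- A's per-length body is a single fold over the (key, spacing) pair list
theorem astep_eq_pairs (ct : String) (L : Int) (d : PySem.Dict String (List Int)) :
    pvAstep ct L d = (pvPairs ct L).foldl (fun d p => d.modify p.1 [] (fun l => l ++ [p.2])) d := by
  unfold pvAstep pvPairs
  rw [List.foldl_flatMap]
  apply PySem.List.foldl_congr_mem
  intro acc a _
  rw [List.foldl_map]
  exact PySem.List.foldl_if_eq_foldl_filter (fun i => pvF ct L i == pvF ct L a)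
    (fun d i => d.modify (pvF ct L a) [] (fun l => l ++ [i - a])) _ acc

-- the positions index maps k to exactly the positions whose substring is k
theorem pvIdx_getD (l : List Int) (f : Int → String) (s : String) :
    ((l.foldl (fun ix b => ix.modify (f b) [] (fun v => v ++ [b])) PySem.Dict.empty).getD s [])
      = l.filter (fun b => f b == s) := by
  rw [show (l.foldl (fun ix b => ix.modify (f b) [] (fun v => v ++ [b])) PySem.Dict.empty)
      = ((l.map (fun b => (f b, b))).foldl (fun d p => d.modify p.1 [] (fun x => x ++ [p.2])) PySem.Dict.empty) from by
    rw [List.foldl_map]]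
  rw [PySem.Dict.getD_foldl_modify_append]
  simp [List.filter_map, Function.comp_def]

-- B's per-length body is a fold of list-extends over the qualifying keys
theorem bstep_eq_keys (ct : String) (L : Int) (d : PySem.Dict String (List Int)) :
    pvBstep ct L d = (pvKq ct L).foldl (fun d k => d.modify k [] (fun l => l ++ pvSpacings L (pvPos ct L k))) d := by
  show ((pvR ct L).foldl (fun ix b => ix.modify (pvF ct L b) [] (fun l => l ++ [b]))
      PySem.Dict.empty).items.foldl (fun d p =>
        if pvSpacings L p.2 = [] then d
        else d.modify p.1 [] (fun l => l ++ pvSpacings L p.2)) d = _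
  have hnd : ((pvR ct L).foldl (fun ix b => ix.modify (pvF ct L b) [] (fun l => l ++ [b]))
      PySem.Dict.empty).keys.Nodup :=
    PySem.Dict.nodup_keys_foldl_modify_key _ _ _ _ _ PySem.Dict.nodup_keys_empty
  have hitems : ((pvR ct L).foldl (fun ix b => ix.modify (pvF ct L b) [] (fun l => l ++ [b]))
      PySem.Dict.empty).items
      = (PySem.Set.ofList ((pvR ct L).map (pvF ct L))).map (fun k => (k, pvPos ct L k)) := by
    rw [PySem.Dict.items_eq_map_keys _ hnd []]
    rw [PySem.Dict.keys_foldl_modify_key]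
    rw [PySem.Dict.keys_empty]
    refine congrArg₂ _ ?_ (PySem.Set.update_empty _)
    funext k
    rw [pvIdx_getD (pvR ct L) (pvF ct L) k]
    rfl
  rw [hitems, List.foldl_map]
  refine Eq.trans (PySem.List.foldl_congr_mem _ _
    (fun (dd : PySem.Dict String (List Int)) k => if ¬ pvSpacings L (pvPos ct L k) = [] then
        dd.modify k [] (fun l => l ++ pvSpacings L (pvPos ct L k)) else dd) _ ?_) ?_
  · intro acc k _
    exact (ite_not _ _ _).symm
  · exact PySem.List.foldl_ite_eq_foldl_filter
      (fun k => ¬ pvSpacings L (pvPos ct L k) = [])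
      (fun (dd : PySem.Dict String (List Int)) k =>
        dd.modify k [] (fun l => l ++ pvSpacings L (pvPos ct L k))) _ _

-- getD of a fold of list-extends over distinct keys
theorem getD_foldl_modify_extend (ks : List String) (g : String → List Int)
    (d : PySem.Dict String (List Int)) (k : String) (h : ks.Nodup) :
    ((ks.foldl (fun d k' => d.modify k' [] (fun l => l ++ g k')) d).getD k [])
      = d.getD k [] ++ (if k ∈ ks then g k else []) := by
  induction ks generalizing d with
  | nil => simp
  | cons k0 t ih =>
    simp only [List.foldl_cons]
    rw [ih _ (List.nodup_cons.mp h).2, PySem.Dict.getD_modify]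
    by_cases hk : k = k0
    · subst hk
      have hkt : k ∉ t := (List.nodup_cons.mp h).1
      simp [hkt]
    · simp [hk, List.mem_cons]

-- flatMap with an if-else-[] body is a flatMap over the filtered list
theorem flatMap_ite_nil {α β : Type} (l : List α) (p : α → Prop) [DecidablePred p] (g : α → List β) :
    (l.flatMap (fun a => if p a then g a else [])) = (l.filter (fun a => decide (p a))).flatMap g := by
  induction l with
  | nil => rfl
  | cons a t ih =>
    by_cases h : p a <;> simp [List.flatMap_cons, h, ih]

-- all ordered pairs of a sorted list, enumerated position-first, are pvSpacings
theorem flatMap_pairs_eq_spacings (L : Int) (l : List Int) (pt : Int → List Int)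
    (hpt : ∀ a ∈ l, pt a = l.filter (fun b => decide (L ≤ b - a)))
    (hs : l.Pairwise (· < ·)) (hL : 0 < L) :
    l.flatMap (fun a => (pt a).map (fun b => b - a)) = pvSpacings L l := by
  induction l with
  | nil => rfl
  | cons a t ih =>
    obtain ⟨hat, ht⟩ := List.pairwise_cons.mp hs
    have hpa := hpt a (List.mem_cons_self ..)
    simp only [List.flatMap_cons, pvSpacings]
    congr 1
    · rw [hpa, List.filter_cons_of_neg (by simp; omega)]
    · refine ih (fun a' ha' => ?_) ht
      have hlt := hat a' ha'
      rw [hpt a' (List.mem_cons_of_mem a ha'), List.filter_cons_of_neg (by simp; omega)]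

-- range(a+L, m) is range(0, m) filtered (for 0 ≤ a+L)
theorem pvRange_filter (a m : Int) (ha : 0 ≤ a) :
    PySem.List.pyRange a m 1 = (PySem.List.pyRange 0 m 1).filter (fun i => decide (a ≤ i)) := by
  by_cases ham : a ≤ m
  · rw [PySem.List.pyRange_one_append 0 a m ha ham, List.filter_append]
    rw [List.filter_eq_nil_iff.mpr, List.filter_eq_self.mpr]
    · simp
    · intro x hx
      have := (PySem.List.mem_pyRange_one.mp hx).1
      simpa using this
    · intro x hx
      have := (PySem.List.mem_pyRange_one.mp hx).2
      simpa using by omega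
  · rw [PySem.List.pyRange_one_eq_nil (by omega)]
    symm
    rw [List.filter_eq_nil_iff]
    intro x hx
    have := (PySem.List.mem_pyRange_one.mp hx).2
    simpa using by omega

-- the partner list of a position a of key k is the tail-filter of pos k
theorem pvPt_eq_pos_filter (ct : String) (L a : Int) (hL : 0 < L) (ha : a ∈ pvR ct L) :
    pvPt ct L a = (pvPos ct L (pvF ct L a)).filter (fun b => decide (L ≤ b - a)) := by
  obtain ⟨ha0, ha1⟩ := PySem.List.mem_pyRange_one.mp (by simpa [pvR] using ha)
  unfold pvPt pvPos pvR
  rw [pvRange_filter (a + L) _ (by omega)]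
  simp only [List.filter_filter]
  apply List.filter_congr
  intro b _
  have hd : (decide (a + L ≤ b)) = (decide (L ≤ b - a)) := decide_eq_decide.mpr (by omega)
  rw [hd, Bool.and_comm]

-- spacings nonempty iff some ordered pair at distance ≥ L exists
theorem pvSpacings_ne_nil_of_pair (L x y : Int) (l : List Int) (hx : x ∈ l) (hy : y ∈ l)
    (hxy : L ≤ y - x) (hL : 0 < L) (hs : l.Pairwise (· < ·)) :
    pvSpacings L l ≠ [] := by
  revert hx hy hs
  induction l with
  | nil => intro hx; cases hx
  | cons a t ih =>
    intro hx hy hs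
    obtain ⟨hat, ht⟩ := List.pairwise_cons.mp hs
    simp only [pvSpacings]
    intro e
    obtain ⟨e1, e2⟩ := List.append_eq_nil_iff.mp e
    rcases List.mem_cons.mp hx with rfl | hx'
    · rcases List.mem_cons.mp hy with rfl | hy'
      · omega
      · have hm : y ∈ t.filter (fun b => decide (L ≤ b - x)) :=
          List.mem_filter.mpr ⟨hy', by simpa using hxy⟩
        exact List.ne_nil_of_mem (List.mem_map_of_mem hm) e1
    · rcases List.mem_cons.mp hy with rfl | hy'
      · exact absurd (hat x hx') (by omega)
      · exact ih hx' hy' ht e2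

theorem pair_of_pvSpacings_ne_nil (L : Int) (l : List Int) (h : pvSpacings L l ≠ []) :
    ∃ x ∈ l, ∃ y ∈ l, L ≤ y - x := by
  induction l with
  | nil => simp [pvSpacings] at h
  | cons a t ih =>
    simp only [pvSpacings] at h
    by_cases h1 : (t.filter (fun b => decide (L ≤ b - a))).map (fun b => b - a) = []
    · have ht : pvSpacings L t ≠ [] := by
        intro e; rw [h1, e] at h; exact h rfl
      obtain ⟨x, hx, y, hy, hxy⟩ := ih ht
      exact ⟨x, List.mem_cons_of_mem a hx, y, List.mem_cons_of_mem a hy, hxy⟩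
    · obtain ⟨z, hz⟩ := List.exists_mem_of_ne_nil _ h1
      obtain ⟨y, hy, _⟩ := List.mem_map.mp hz
      obtain ⟨hyt, hLy⟩ := List.mem_filter.mp hy
      exact ⟨a, List.mem_cons_self .., y, List.mem_cons_of_mem a hyt, by simpa using hLy⟩

-- Set helpers
theorem set_add_eq_of_mem {x : String} {s : PySem.Set String} (h : x ∈ s) : PySem.Set.add s x = s := by
  simp only [PySem.Set.add]
  rw [if_pos (by simpa using h)]

theorem set_update_map_const (s : PySem.Set String) (l : List Int) (x : String) (h : l ≠ []) :
    PySem.Set.update s (l.map (fun _ => x)) = PySem.Set.add s x := by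
  induction l generalizing s with
  | nil => exact absurd rfl h
  | cons b t ih =>
    simp only [List.map_cons]
    rw [PySem.Set.update_cons]
    by_cases ht : t = []
    · subst ht; simp [PySem.Set.update_nil]
    · rw [ih _ ht, set_add_eq_of_mem]
      exact (PySem.Set.mem_add s x x).mpr (Or.inr rfl)

theorem set_ofList_filter (l : List String) (q : String → Bool) :
    PySem.Set.ofList (l.filter q) = (PySem.Set.ofList l).filter q := by
  induction l with
  | nil => rfl
  | cons x xs ih =>
    have hd : ∀ (s : PySem.Set String) (y : String),
        PySem.Set.discard s y = s.filter (fun z => !(z == y)) := fun _ _ => rfl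
    by_cases hq : q x
    · rw [List.filter_cons_of_pos hq, PySem.Set.ofList_cons, ih, hd,
        PySem.Set.ofList_cons, List.filter_cons_of_pos hq, hd]
      simp only [List.filter_filter]
      congr 1
      apply List.filter_congr
      intro y _
      rw [Bool.and_comm]
    · rw [List.filter_cons_of_neg (by simp [hq]), ih, PySem.Set.ofList_cons,
        List.filter_cons_of_neg (by simp [hq]), hd]
      simp only [List.filter_filter]
      apply List.filter_congr
      intro y _
      by_cases hyx : y = x
      · subst hyx; simp [hq]
      · simp [hyx]

theorem set_update_ofList (s : PySem.Set String) (l : List String) :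
    PySem.Set.update s (PySem.Set.ofList l) = PySem.Set.update s l := by
  rw [PySem.Set.update_eq_append_filter, PySem.Set.update_eq_append_filter, PySem.Set.ofList_ofList]

-- key-order lemma: appending keys in pair order or in first-occurrence order gives the same set
theorem update_flatMap_const_eq (R : List Int) (s : PySem.Set String) (f : Int → String)
    (pt : Int → List Int) (q : String → Bool)
    (hR : R.Pairwise (· < ·))
    (h1 : ∀ a ∈ R, pt a ≠ [] → q (f a) = true)
    (h2 : ∀ a ∈ R, q (f a) = true → pt a = [] →
        f a ∈ s ∨ ∃ a0 ∈ R, a0 < a ∧ f a0 = f a ∧ pt a0 ≠ []) :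
    PySem.Set.update s (R.flatMap (fun a => (pt a).map (fun _ => f a)))
      = PySem.Set.update s ((R.filter (fun a => q (f a))).map f) := by
  induction R generalizing s with
  | nil => rfl
  | cons a t ih =>
    obtain ⟨hat, ht⟩ := List.pairwise_cons.mp hR
    simp only [List.flatMap_cons, List.filter_cons]
    by_cases hpt0 : pt a = []
    · by_cases hq0 : q (f a) = true
      · -- a contributes no pairs but its key already occurred earlier impossible, so it is in s
        have hin : f a ∈ s := by
          rcases h2 a (List.mem_cons_self ..) hq0 hpt0 with h | ⟨a0, ha0, hlt, _, hpt⟩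
          · exact h
          · rcases List.mem_cons.mp ha0 with rfl | ha0'
            · exact absurd hpt0 hpt
            · exact absurd (hat a0 ha0') (by omega)
        rw [hpt0]
        simp only [List.map_nil, List.nil_append, hq0, if_pos]
        rw [List.map_cons, PySem.Set.update_cons, set_add_eq_of_mem hin]
        refine ih _ ht (fun a' ha' hp => h1 a' (List.mem_cons_of_mem a ha') hp)
          (fun a' ha' hq hp => ?_)
        rcases h2 a' (List.mem_cons_of_mem a ha') hq hp with h | ⟨a0, ha0, hlt, hf0, hpt⟩
        · exact Or.inl h
        · rcases List.mem_cons.mp ha0 with rfl | ha0'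
          · exact absurd hpt0 hpt
          · exact Or.inr ⟨a0, ha0', hlt, hf0, hpt⟩
      · rw [hpt0]
        simp only [List.map_nil, List.nil_append, hq0, if_neg, Bool.false_eq_true,
          not_false_iff]
        refine ih _ ht (fun a' ha' hp => h1 a' (List.mem_cons_of_mem a ha') hp)
          (fun a' ha' hq hp => ?_)
        rcases h2 a' (List.mem_cons_of_mem a ha') hq hp with h | ⟨a0, ha0, hlt, hf0, hpt⟩
        · exact Or.inl h
        · rcases List.mem_cons.mp ha0 with rfl | ha0'
          · exact absurd hpt0 hpt
          · exact Or.inr ⟨a0, ha0', hlt, hf0, hpt⟩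
    · have hq0 : q (f a) = true := h1 a (List.mem_cons_self ..) hpt0
      rw [PySem.Set.update_append, set_update_map_const _ _ _ hpt0]
      simp only [hq0, if_pos]
      rw [List.map_cons, PySem.Set.update_cons]
      refine ih _ ht (fun a' ha' hp => h1 a' (List.mem_cons_of_mem a ha') hp)
        (fun a' ha' hq hp => ?_)
      rcases h2 a' (List.mem_cons_of_mem a ha') hq hp with h | ⟨a0, ha0, hlt, hf0, hpt⟩
      · exact Or.inl ((PySem.Set.mem_add s (f a) (f a')).mpr (Or.inl h))
      · rcases List.mem_cons.mp ha0 with rfl | ha0'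
        · exact Or.inl ((PySem.Set.mem_add s (f a0) (f a')).mpr (Or.inr hf0.symm))
        · exact Or.inr ⟨a0, ha0', hlt, hf0, hpt⟩

-- filter+project distributes over flatMap
theorem filter_map_flatMap (l : List Int) (g : Int → List (String × Int)) (k : String) :
    ((l.flatMap g).filter (fun p => p.1 == k)).map (fun p => p.2)
      = l.flatMap (fun a => ((g a).filter (fun p => p.1 == k)).map (fun p => p.2)) := by
  induction l with
  | nil => rfl
  | cons a t ih => simp only [List.flatMap_cons, List.filter_append, List.map_append, ih]

-- appending keys in pair order or in first-occurrence order updates a set equally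
theorem keyorder (ct : String) (L : Int) (hL : 0 < L) (s : PySem.Set String) :
    PySem.Set.update s ((pvPairs ct L).map (fun p => p.1)) = PySem.Set.update s (pvKq ct L) := by
  have hmap : (pvPairs ct L).map (fun p => p.1)
      = (pvR ct L).flatMap (fun a => (pvPt ct L a).map (fun _ => pvF ct L a)) := by
    simp only [pvPairs, List.map_flatMap, List.map_map]
    rfl
  have hkq : PySem.Set.update s (pvKq ct L)
      = PySem.Set.update s (((pvR ct L).filter (fun a => pvQ ct L (pvF ct L a))).map (pvF ct L)) := by
    show PySem.Set.update s ((PySem.Set.ofList ((pvR ct L).map (pvF ct L))).filter (pvQ ct L)) = _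
    rw [← set_ofList_filter, set_update_ofList, List.filter_map]
    rfl
  rw [hmap, hkq]
  apply update_flatMap_const_eq (pvR ct L) s (pvF ct L) (pvPt ct L) (pvQ ct L)
  · exact PySem.List.pairwise_lt_pyRange_one 0 _
  · intro a haR hpt
    obtain ⟨i, hi⟩ := List.exists_mem_of_ne_nil _ hpt
    obtain ⟨hirange, hif⟩ := List.mem_filter.mp hi
    obtain ⟨hi1, hi2⟩ := PySem.List.mem_pyRange_one.mp hirange
    obtain ⟨ha0, _⟩ := PySem.List.mem_pyRange_one.mp
      (show a ∈ PySem.List.pyRange 0 (PySem.Str.len ct - L) 1 from haR)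
    have hposa : a ∈ pvPos ct L (pvF ct L a) := List.mem_filter.mpr ⟨haR, by simp⟩
    have hposi : i ∈ pvPos ct L (pvF ct L a) := List.mem_filter.mpr
      ⟨show i ∈ pvR ct L from PySem.List.mem_pyRange_one.mpr ⟨by omega, hi2⟩, hif⟩
    have hpw : (pvPos ct L (pvF ct L a)).Pairwise (· < ·) :=
      List.Pairwise.filter _ (PySem.List.pairwise_lt_pyRange_one 0 _)
    have hne := pvSpacings_ne_nil_of_pair L a i _ hposa hposi (by omega) hL hpw
    simp [pvQ, hne]
  · intro a haR hq hpt
    right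
    have hsp : pvSpacings L (pvPos ct L (pvF ct L a)) ≠ [] := by simpa [pvQ] using hq
    obtain ⟨x, hx, y, hy, hxy⟩ := pair_of_pvSpacings_ne_nil _ _ hsp
    obtain ⟨hxR, hxf⟩ := List.mem_filter.mp hx
    obtain ⟨hyR, hyf⟩ := List.mem_filter.mp hy
    obtain ⟨hy0, hy1⟩ := PySem.List.mem_pyRange_one.mp
      (show y ∈ PySem.List.pyRange 0 (PySem.Str.len ct - L) 1 from hyR)
    have hfx : pvF ct L x = pvF ct L a := by simpa using hxf
    have hfy : pvF ct L y = pvF ct L a := by simpa using hyf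
    have hyx : y ∈ pvPt ct L x := List.mem_filter.mpr
      ⟨PySem.List.mem_pyRange_one.mpr ⟨by omega, hy1⟩, by simp [hfy, hfx]⟩
    have hxa : x < a := by
      rcases lt_or_ge x a with h | h
      · exact h
      · exfalso
        have hmem : y ∈ pvPt ct L a := List.mem_filter.mpr
          ⟨PySem.List.mem_pyRange_one.mpr ⟨by omega, hy1⟩, by simp [hfy]⟩
        rw [hpt] at hmem
        cases hmem
    exact ⟨x, hxR, hxa, hfx, List.ne_nil_of_mem hyx⟩

-- per-key value lists agree
theorem pairs_values_eq (ct : String) (L : Int) (hL : 0 < L) (k : String) :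
    ((pvPairs ct L).filter (fun p => p.1 == k)).map (fun p => p.2) = pvSpacings L (pvPos ct L k) := by
  have h1 : ((pvPairs ct L).filter (fun p => p.1 == k)).map (fun p => p.2)
      = (pvR ct L).flatMap (fun a => if pvF ct L a = k then (pvPt ct L a).map (fun i => i - a) else []) := by
    unfold pvPairs
    rw [filter_map_flatMap]
    apply List.flatMap_congr
    intro a _
    by_cases hk : pvF ct L a = k
    · have hall : ∀ p ∈ (pvPt ct L a).map (fun i => (pvF ct L a, i - a)), (p.1 == k) = true := by
        intro p hp
        obtain ⟨i, _, rfl⟩ := List.mem_map.mp hp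
        simpa using hk
      rw [if_pos hk, List.filter_eq_self.mpr hall, List.map_map]
      rfl
    · have hnone : ∀ p ∈ (pvPt ct L a).map (fun i => (pvF ct L a, i - a)), ¬ ((p.1 == k) = true) := by
        intro p hp
        obtain ⟨i, _, rfl⟩ := List.mem_map.mp hp
        simpa using hk
      rw [if_neg hk, List.filter_eq_nil_iff.mpr hnone, List.map_nil]
  rw [h1, flatMap_ite_nil]
  have hdec : (pvR ct L).filter (fun a => decide (pvF ct L a = k)) = pvPos ct L k := by
    unfold pvPos
    apply List.filter_congr
    intro b _
    by_cases h : pvF ct L b = k <;> simp [h]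
  rw [hdec]
  apply flatMap_pairs_eq_spacings L (pvPos ct L k) (pvPt ct L) ?_ ?_ hL
  · intro a ha
    obtain ⟨haR, haf⟩ := List.mem_filter.mp ha
    have hfa : pvF ct L a = k := by simpa using haf
    rw [pvPt_eq_pos_filter ct L a hL haR, hfa]
  · exact List.Pairwise.filter _ (PySem.List.pairwise_lt_pyRange_one 0 _)

-- per-length steps are equal
theorem step_eq (ct : String) (L : Int) (hL : 0 < L) (d : PySem.Dict String (List Int))
    (hnd : d.keys.Nodup) : pvAstep ct L d = pvBstep ct L d := by
  rw [astep_eq_pairs, bstep_eq_keys]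
  have hndKq : (pvKq ct L).Nodup := List.Nodup.filter _ (PySem.Set.nodup_ofList _)
  have hndA : ((pvPairs ct L).foldl (fun d p => d.modify p.1 [] (fun l => l ++ [p.2])) d).keys.Nodup :=
    PySem.Dict.nodup_keys_foldl_modify_key _ _ _ _ _ hnd
  have hndB : ((pvKq ct L).foldl (fun d k =>
      d.modify k [] (fun l => l ++ pvSpacings L (pvPos ct L k))) d).keys.Nodup :=
    PySem.Dict.nodup_keys_foldl_modify_key _ _ _ _ _ hnd
  apply PySem.Dict.ext
  rw [PySem.Dict.items_eq_map_keys _ hndA [], PySem.Dict.items_eq_map_keys _ hndB []]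
  have hkA : ((pvPairs ct L).foldl (fun d p => d.modify p.1 [] (fun l => l ++ [p.2])) d).keys
      = PySem.Set.update d.keys ((pvPairs ct L).map (fun p => p.1)) :=
    PySem.Dict.keys_foldl_modify_key _ _ _ _ _
  have hkB : ((pvKq ct L).foldl (fun d k =>
      d.modify k [] (fun l => l ++ pvSpacings L (pvPos ct L k))) d).keys
      = PySem.Set.update d.keys ((pvKq ct L).map (fun k => k)) :=
    PySem.Dict.keys_foldl_modify_key _ _ _ _ _
  rw [hkA, hkB, List.map_id', keyorder ct L hL d.keys]
  apply List.map_congr_left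
  intro k _
  have hgA : ((pvPairs ct L).foldl (fun d p => d.modify p.1 [] (fun l => l ++ [p.2])) d).getD k []
      = d.getD k [] ++ pvSpacings L (pvPos ct L k) := by
    rw [PySem.Dict.getD_foldl_modify_append, pairs_values_eq ct L hL k]
  have hgB : ((pvKq ct L).foldl (fun d k' =>
      d.modify k' [] (fun l => l ++ pvSpacings L (pvPos ct L k'))) d).getD k []
      = d.getD k [] ++ (if k ∈ pvKq ct L then pvSpacings L (pvPos ct L k) else []) :=
    getD_foldl_modify_extend _ _ _ _ hndKq
  rw [hgA, hgB]
  by_cases hsp : pvSpacings L (pvPos ct L k) = []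
  · simp [hsp]
  · have hpos : pvPos ct L k ≠ [] := by
      intro e; rw [e] at hsp; exact hsp rfl
    obtain ⟨b, hb⟩ := List.exists_mem_of_ne_nil _ hpos
    obtain ⟨hbR, hbf⟩ := List.mem_filter.mp hb
    have hkK : k ∈ PySem.Set.ofList ((pvR ct L).map (pvF ct L)) := by
      have hm : k ∈ (pvR ct L).map (pvF ct L) := List.mem_map.mpr ⟨b, hbR, by simpa using hbf⟩
      simpa using hm
    have hkq : k ∈ pvKq ct L := List.mem_filter.mpr ⟨hkK, by simp [pvQ, hsp]⟩
    rw [if_pos hkq]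

theorem astep_nodup (ct : String) (L : Int) (d : PySem.Dict String (List Int))
    (hnd : d.keys.Nodup) : (pvAstep ct L d).keys.Nodup := by
  rw [astep_eq_pairs]
  exact PySem.Dict.nodup_keys_foldl_modify_key _ _ _ _ _ hnd

-- ===== VERDICT (by name: the statement is the Claim_ definition above) =====
theorem get_seq_spacing_py_spec : Claim_equal_get_seq_spacing_py := by
  intro ct _
  unfold Spec_get_seq_spacing_py
  rw [portA_eq_steps, portB_eq_steps]
  have h36 : PySem.List.pyRange 3 6 1 = [3, 4, 5] := by decide
  rw [h36]
  simp only [List.foldl_cons, List.foldl_nil]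
  have n0 : (PySem.Dict.empty : PySem.Dict String (List Int)).keys.Nodup := PySem.Dict.nodup_keys_empty
  have n3 := astep_nodup ct 3 _ n0
  have n4 := astep_nodup ct 4 _ n3
  rw [step_eq ct 3 (by norm_num) _ n0, ← step_eq ct 3 (by norm_num) _ n0,
      step_eq ct 4 (by norm_num) _ n3, ← step_eq ct 4 (by norm_num) _ n3,
      step_eq ct 5 (by norm_num) _ n4]
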